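-- pv_equiv track=rewrite | github.com/981377660LMT/algorithm-study | 22_专题/前缀与差分/经典题/AlphaPresum/2168. 出现的字符count全相等次的子串数-每个字母的前缀和.py | equalDigitFrequency
-- ===== SOURCE A (Python) =====
-- def equalDigitFrequency(s: str) -> int:
--     """Given a digit string s, return the number of unique substrings of s where every digit appears the same number of times."""
--
--     def check(left: int, right: int) -> bool:
--         """"[left,right] 这一段子串符合题意"""
--         diff = set()
--         for i in range(10):
--             count = preSum[right + 1][i] - preSum[left][i]
--             if count > 0:
--                 diff.add(count)
--             if len(diff) > 1:
--                 return False
--         return True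
--
--     n = len(s)
--
--     # 预处理前缀
--     # preSum = [[0] * 10 for _ in range(n + 1)]
--     # for i in range(1, n + 1):
--     #     preSum[i][ord(s[i - 1]) - ord('0')] += 1
--     #     for j in range(10):
--     #         preSum[i][j] += preSum[i - 1][j]
--     preSum = [[0] * 10]
--     for char in s:
--         cur = preSum[-1][:]
--         cur[ord(char) - ord('0')] += 1
--         preSum.append(cur)
--
--     res = set()
--     # 枚举所有子串
--     for i in range(n):
--         for j in range(i, n):
--             if check(i, j):
--                 res.add(s[i : j + 1])
--
--     return len(res)
-- ===== SOURCE B (Python) =====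
-- def equalDigitFrequency(s: str) -> int:
--     """Given a digit string s, return the number of unique substrings of s where every digit appears the same number of times."""
--     n = len(s)
--     res = set()
--     for i in range(n):
--         count = [0] * 10
--         cur = ""
--         for j in range(i, n):
--             c = s[j]
--             cur += c
--             count[int(c)] += 1
--             if len({v for v in count if v}) <= 1:
--                 res.add(cur)
--     return len(res)
-- ===== Notes on version B (the rewrite author's own statement) =====
-- stated objective: simpler
-- what changed: Drops A's (n+1)x10 prefix-sum table and its per-substring row-subtraction check; B keeps one incremental 10-slot count and the growing substring per start index, testing validity directly on the running count.
-- outside the precondition, e.g. on equalDigitFrequency('+5'): A returns 3, B raises ValueError; on equalDigitFrequency('//'): A returns 2, B raises ValueError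
import Mathlib
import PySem

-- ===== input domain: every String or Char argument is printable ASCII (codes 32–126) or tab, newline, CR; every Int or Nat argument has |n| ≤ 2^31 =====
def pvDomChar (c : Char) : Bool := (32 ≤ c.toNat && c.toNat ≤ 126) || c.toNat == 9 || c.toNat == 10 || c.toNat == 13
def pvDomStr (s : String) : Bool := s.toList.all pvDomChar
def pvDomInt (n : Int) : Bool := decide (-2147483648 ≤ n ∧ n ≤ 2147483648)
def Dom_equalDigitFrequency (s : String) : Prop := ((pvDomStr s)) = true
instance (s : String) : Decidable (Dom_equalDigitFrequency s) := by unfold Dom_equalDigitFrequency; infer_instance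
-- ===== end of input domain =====

-- B drops A's (n+1)×10 prefix-sum table and its per-substring row subtraction, maintaining one
-- incremental 10-slot count per start index instead (objective: simpler; same asymptotic cost).

-- ===== PORT A =====

-- the per-i body of A's check loop: preSum[right+1][i] - preSum[left][i]
def psCnt (preSum : List (List Int)) (left right i : Int) : Int :=
  PySem.List.pyGetD (PySem.List.pyGetD preSum (right + 1) []) i 0
    - PySem.List.pyGetD (PySem.List.pyGetD preSum left []) i 0

-- check's 'for i in range(10)' with its two early 'return False' exits, as structural recursion
def psCheckLoop (preSum : List (List Int)) (left right : Int) :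
    List Int → PySem.Set Int → Bool
  | [], _ => true
  | i :: rest, diff =>
      let count := psCnt preSum left right i
      let diff' := if 0 < count then PySem.Set.add diff count else diff
      if 1 < PySem.List.len diff' then false else psCheckLoop preSum left right rest diff'

def psCheck (preSum : List (List Int)) (left right : Int) : Bool :=
  psCheckLoop preSum left right (PySem.List.pyRange 0 10 1) PySem.Set.empty

-- 'cur = preSum[-1][:]; cur[ord(char) - ord('0')] += 1; preSum.append(cur)'
-- (pySetD/pyGetD are the total forms of Python's indexing; exact on indices in range, i.e. under Pre_)
def psStep (ps : List (List Int)) (char : Char) : List (List Int) :=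
  let cur := PySem.List.pyGetD ps (-1) []
  let cur := PySem.List.pySetD cur ((char.toNat : Int) - 48)
      (PySem.List.pyGetD cur ((char.toNat : Int) - 48) 0 + 1)
  ps ++ [cur]

def equalDigitFrequency (s : String) : Int :=
  let l := s.toList
  let n : Int := PySem.List.len l
  let preSum : List (List Int) := l.foldl psStep [List.replicate 10 0]
  let res : PySem.Set (List Char) :=
    (PySem.List.pyRange 0 n 1).foldl (fun res i =>
      (PySem.List.pyRange i n 1).foldl (fun res j =>
        if psCheck preSum i j then
          PySem.Set.add res (PySem.List.slice l (some i) (some (j + 1)))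
        else res) res) PySem.Set.empty
  PySem.List.len res

-- ===== PORT B =====

-- 'len({v for v in count if v}) <= 1'
def altValid (count : List Int) : Bool :=
  decide (PySem.List.len (PySem.Set.ofList (count.filter (fun v => v != 0))) ≤ 1)

-- body of B's inner loop: state = (count, cur, res); int(c) = ord(c) - 48 on the digit chars Pre_ admits
def altStep (l : List Char) (st : List Int × List Char × PySem.Set (List Char)) (j : Int) :
    List Int × List Char × PySem.Set (List Char) :=
  let c := PySem.List.pyGetD l j ' '
  let cur := st.2.1 ++ [c]
  let count := PySem.List.pySetD st.1 ((c.toNat : Int) - 48)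
      (PySem.List.pyGetD st.1 ((c.toNat : Int) - 48) 0 + 1)
  let res := if altValid count then PySem.Set.add st.2.2 cur else st.2.2
  (count, cur, res)

def equalDigitFrequency_alt (s : String) : Int :=
  let l := s.toList
  let n : Int := PySem.List.len l
  let res : PySem.Set (List Char) :=
    (PySem.List.pyRange 0 n 1).foldl (fun res i =>
      ((PySem.List.pyRange i n 1).foldl (altStep l)
        (List.replicate 10 0, ([], res))).2.2) PySem.Set.empty
  PySem.List.len res

-- ===== PRECONDITION & SPEC =====
-- Pre_ is the function's natural domain per its docstring: digit strings. On non-digit characters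
-- A raises IndexError, except character codes 38..47 where A returns a value only through Python's
-- negative-index wraparound into the 10-slot count row; B's int(c) raises ValueError on every non-digit.
def Pre_equalDigitFrequency (s : String) : Prop :=
  (s.toList.all (fun c => 48 ≤ c.toNat && c.toNat ≤ 57)) = true
instance (s : String) : Decidable (Pre_equalDigitFrequency s) := by
  unfold Pre_equalDigitFrequency; infer_instance

def pvWitness_equalDigitFrequency : String := "1212"

def Spec_equalDigitFrequency (s : String) (out : Int) : Prop := out = equalDigitFrequency_alt s
instance (s : String) (out : Int) : Decidable (Spec_equalDigitFrequency s out) := by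
  unfold Spec_equalDigitFrequency; infer_instance

-- ===== CLAIM (what is proved, stated in full; the proofs are below) =====
def Claim_equal_equalDigitFrequency : Prop :=
  ∀ (s : String), Dom_equalDigitFrequency s → Pre_equalDigitFrequency s →
    Spec_equalDigitFrequency s (equalDigitFrequency s)

-- ===== LEMMAS AND PROOFS =====

-- the digit-count vector of a character list: entry d = number of occurrences of digit d
def cnts (t : List Char) : List Int :=
  (List.range 10).map (fun d => ((t.countP (fun c => c.toNat == d + 48) : Nat) : Int))

theorem cnts_nil : cnts [] = List.replicate 10 0 := by decide

theorem getD_cnts (t : List Char) (d : Nat) (hd : d < 10) :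
    (cnts t).getD d 0 = ((t.countP (fun c => c.toNat == d + 48) : Nat) : Int) := by
  simp [cnts, List.getD_eq_getElem?_getD, List.getElem?_range hd]

theorem cnts_append_digit (t : List Char) (c : Char) (h48 : 48 ≤ c.toNat) (h57 : c.toNat ≤ 57) :
    PySem.List.pySetD (cnts t) ((c.toNat : Int) - 48)
      (PySem.List.pyGetD (cnts t) ((c.toNat : Int) - 48) 0 + 1) = cnts (t ++ [c]) := by
  have hk : ((c.toNat : Int) - 48) = ((c.toNat - 48 : Nat) : Int) := by omega
  rw [hk, PySem.List.pySetD_natCast, PySem.List.pyGetD_natCast,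
    getD_cnts t (c.toNat - 48) (by omega)]
  apply List.ext_getElem
  · simp [cnts]
  · intro m hm1 hm2
    have hm : m < 10 := by simpa [cnts] using hm2
    rw [List.getElem_set]
    by_cases he : c.toNat - 48 = m
    · rw [if_pos he]
      simp only [cnts, List.getElem_map, List.getElem_range]
      rw [List.countP_append, List.countP_singleton]
      have hb : (c.toNat == m + 48) = true := by simp; omega
      rw [hb]
      subst he
      simp
    · rw [if_neg he]
      simp only [cnts, List.getElem_map, List.getElem_range]
      rw [List.countP_append, List.countP_singleton]
      have hb : (c.toNat == m + 48) = false := by simp; omega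
      rw [hb]
      simp

theorem buildPS_spec (l : List Char) (hd : ∀ c ∈ l, 48 ≤ c.toNat ∧ c.toNat ≤ 57) :
    l.foldl psStep [List.replicate 10 0]
      = (List.range (l.length + 1)).map (fun k => cnts (l.take k)) := by
  induction l using List.reverseRecOn with
  | nil => simp [cnts_nil]
  | append_singleton l c ih =>
    have hdl : ∀ x ∈ l, 48 ≤ x.toNat ∧ x.toNat ≤ 57 := fun x hx => hd x (by simp [hx])
    have hc := hd c (by simp)
    rw [List.foldl_append, ih hdl, List.foldl_cons, List.foldl_nil]
    unfold psStep
    rw [List.range_succ, List.map_append]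
    simp only [List.map_cons, List.map_nil]
    rw [PySem.List.pyGetD_neg_one_append_singleton]
    rw [List.take_length, cnts_append_digit l c hc.1 hc.2]
    have hlen : (l ++ [c]).length = l.length + 1 := by simp
    rw [hlen, List.range_succ, List.map_append, List.range_succ, List.map_append]
    congr 1
    · congr 1
      · apply List.map_congr_left
        intro k hk
        simp at hk
        rw [List.take_append_of_le_length (by omega)]
      · simp [List.take_append_of_le_length (le_refl l.length), List.take_length]
    · simp [List.take_of_length_le (by simp : (l ++ [c]).length ≤ l.length + 1)]

theorem rows_getD (l : List Char) (hd : ∀ c ∈ l, 48 ≤ c.toNat ∧ c.toNat ≤ 57)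
    (m : Int) (h0 : 0 ≤ m) (hm : m ≤ l.length) :
    PySem.List.pyGetD (l.foldl psStep [List.replicate 10 0]) m [] = cnts (l.take m.toNat) := by
  rw [buildPS_spec l hd]
  have hcast : m = ((m.toNat : Nat) : Int) := by omega
  rw [hcast, PySem.List.pyGetD_natCast]
  have hlt : m.toNat < l.length + 1 := by omega
  rw [List.getD_eq_getElem?_getD, List.getElem?_map, List.getElem?_range hlt]
  simp [max_eq_left h0]

theorem len_le_add (d : PySem.Set Int) (x : Int) : d.length ≤ (PySem.Set.add d x).length := by
  rw [PySem.Set.add_eq_ite]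
  split <;> simp

theorem len_le_addFold (g : Int → Int) (idxs : List Int) (diff : PySem.Set Int) :
    diff.length ≤ (idxs.foldl (fun d i => if 0 < g i then PySem.Set.add d (g i) else d) diff).length := by
  induction idxs generalizing diff with
  | nil => simp
  | cons i rest ih =>
    simp only [List.foldl_cons]
    refine le_trans ?_ (ih _)
    split
    · exact len_le_add diff (g i)
    · exact le_refl _

theorem psCheckLoop_eq (ps : List (List Int)) (left right : Int) (idxs : List Int)
    (diff : PySem.Set Int) (hsmall : diff.length ≤ 1) :
    psCheckLoop ps left right idxs diff =
      decide (PySem.List.len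
        (idxs.foldl (fun d i =>
          if 0 < psCnt ps left right i then PySem.Set.add d (psCnt ps left right i) else d) diff) ≤ 1) := by
  induction idxs generalizing diff with
  | nil =>
    simp only [psCheckLoop, List.foldl_nil, PySem.List.len_eq]
    symm
    rw [decide_eq_true_iff]
    exact_mod_cast hsmall
  | cons i rest ih =>
    rw [psCheckLoop]
    simp only [List.foldl_cons]
    set diff' := if 0 < psCnt ps left right i then PySem.Set.add diff (psCnt ps left right i) else diff with hdiff'
    by_cases hbig : 1 < PySem.List.len diff'
    · rw [if_pos hbig]
      symm
      rw [decide_eq_false_iff_not]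
      rw [← hdiff']
      have hmono : diff'.length ≤ (List.foldl (fun d i =>
          if 0 < psCnt ps left right i then PySem.Set.add d (psCnt ps left right i) else d) diff' rest).length :=
        len_le_addFold _ _ _
      intro hc
      have hc' : (List.foldl (fun d i =>
          if 0 < psCnt ps left right i then PySem.Set.add d (psCnt ps left right i) else d) diff' rest).length ≤ 1 := by
        simp only [PySem.List.len_eq] at hc
        exact_mod_cast hc
      have hcomb := le_trans hmono hc'
      simp only [PySem.List.len_eq] at hbig
      omega
    · rw [if_neg hbig]
      simp only [← hdiff']
      refine ih diff' ?_
      simp only [PySem.List.len_eq] at hbig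
      omega

theorem psCheck_eq_altValid (ps : List (List Int)) (left right : Int) (count : List Int)
    (hlen : count.length = 10) (hnn : ∀ v ∈ count, 0 ≤ v)
    (hcnt : ∀ i : Int, 0 ≤ i → i < 10 → psCnt ps left right i = PySem.List.pyGetD count i 0) :
    psCheck ps left right = altValid count := by
  rw [psCheck, psCheckLoop_eq _ _ _ _ _ (by simp [PySem.Set.empty])]
  have hcong : (PySem.List.pyRange 0 10 1).foldl (fun d i =>
        if 0 < psCnt ps left right i then PySem.Set.add d (psCnt ps left right i) else d) PySem.Set.empty
      = (PySem.List.pyRange 0 10 1).foldl (fun d i =>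
        if 0 < PySem.List.pyGetD count i 0 then PySem.Set.add d (PySem.List.pyGetD count i 0) else d)
        PySem.Set.empty := by
    apply PySem.List.foldl_congr_mem
    intro acc x hx
    rw [PySem.List.mem_pyRange_one] at hx
    rw [hcnt x hx.1 hx.2]
  rw [hcong]
  have h10 : PySem.List.pyRange 0 10 1 = PySem.List.pyRange 0 (PySem.List.len count) 1 := by
    simp [PySem.List.len_eq, hlen]
  rw [h10, PySem.List.foldl_pyRange_zero_pyGetD count 0
    (fun d v => if 0 < v then PySem.Set.add d v else d) PySem.Set.empty]
  rw [PySem.List.foldl_ite_eq_foldl_filter]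
  have hfil : count.filter (fun v => decide (0 < v)) = count.filter (fun v => v != 0) := by
    apply List.filter_congr
    intro v hv
    have hv0 := hnn v hv
    by_cases h : v = 0
    · subst h; simp
    · have h1 : decide (0 < v) = true := by simp; omega
      have h2 : (v != 0) = true := by simpa using h
      rw [h1, h2]
  rw [altValid]
  rw [hfil]
  rfl

theorem pyGetD_cnts_int (t : List Char) (i : Int) (h0 : 0 ≤ i) (hi : i < 10) :
    PySem.List.pyGetD (cnts t) i 0
      = ((t.countP (fun c => c.toNat == i.toNat + 48) : Nat) : Int) := by
  have hcast : i = ((i.toNat : Nat) : Int) := by omega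
  conv_lhs => rw [hcast]
  rw [PySem.List.pyGetD_natCast, getD_cnts t i.toNat (by omega)]

theorem psCnt_spec (l : List Char) (hd : ∀ c ∈ l, 48 ≤ c.toNat ∧ c.toNat ≤ 57)
    (left right i : Int) (h0 : 0 ≤ left) (hlr : left ≤ right) (hr : right < l.length)
    (hi0 : 0 ≤ i) (hi : i < 10) :
    psCnt (l.foldl psStep [List.replicate 10 0]) left right i
      = PySem.List.pyGetD (cnts ((l.drop left.toNat).take ((right + 1).toNat - left.toNat))) i 0 := by
  rw [psCnt, rows_getD l hd (right + 1) (by omega) (by omega),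
    rows_getD l hd left (by omega) (by omega)]
  rw [pyGetD_cnts_int _ i hi0 hi, pyGetD_cnts_int _ i hi0 hi, pyGetD_cnts_int _ i hi0 hi]
  have hsplit : l.take (right + 1).toNat
      = l.take left.toNat ++ (l.drop left.toNat).take ((right + 1).toNat - left.toNat) := by
    rw [← List.take_add]
    congr 1
    omega
  rw [hsplit, List.countP_append]
  push_cast
  ring

theorem inner_inv (l : List Char) (hd : ∀ c ∈ l, 48 ≤ c.toNat ∧ c.toNat ≤ 57)
    (i : Int) (hi0 : 0 ≤ i) (hin : i < l.length) :
    ∀ (m : Nat) (j0 : Int), i ≤ j0 → j0 ≤ l.length → m = ((l.length : Int) - j0).toNat →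
    ∀ res : PySem.Set (List Char),
    (PySem.List.pyRange j0 l.length 1).foldl (fun res j =>
        if psCheck (l.foldl psStep [List.replicate 10 0]) i j then
          PySem.Set.add res (PySem.List.slice l (some i) (some (j + 1)))
        else res) res
      = ((PySem.List.pyRange j0 l.length 1).foldl (altStep l)
          (cnts ((l.drop i.toNat).take (j0 - i).toNat),
            ((l.drop i.toNat).take (j0 - i).toNat, res))).2.2 := by
  intro m
  induction m with
  | zero =>
    intro j0 hij hjn hm res
    have hj0 : j0 = l.length := by omega
    subst hj0
    rw [PySem.List.pyRange_one_eq_nil (le_refl _)]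
    simp
  | succ m ih =>
    intro j0 hij hjn hm res
    have hjlt : j0 < l.length := by omega
    rw [PySem.List.pyRange_one_cons hjlt]
    simp only [List.foldl_cons]
    have hjnat : j0.toNat < l.length := by omega
    set c := l[j0.toNat] with hc
    have hcl : c ∈ l := List.getElem_mem hjnat
    have hcd := hd c hcl
    set w := (l.drop i.toNat).take (j0 - i).toNat with hw
    -- the fetched character
    have hget : PySem.List.pyGetD l j0 ' ' = c := by
      have hcast : j0 = ((j0.toNat : Nat) : Int) := by omega
      rw [hcast, PySem.List.pyGetD_natCast, List.getD_eq_getElem?_getD,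
        List.getElem?_eq_getElem hjnat]
      rfl
    -- extending the window
    have hwc : w ++ [c] = (l.drop i.toNat).take ((j0 + 1) - i).toNat := by
      have h1 : ((j0 + 1) - i).toNat = (j0 - i).toNat + 1 := by omega
      rw [h1, List.take_add_one]
      congr 1
      rw [List.getElem?_drop]
      have h2 : i.toNat + (j0 - i).toNat = j0.toNat := by omega
      rw [h2, List.getElem?_eq_getElem hjnat]
      rfl
    -- the slice A adds
    have hslice : PySem.List.slice l (some i) (some (j0 + 1)) = w ++ [c] := by
      rw [PySem.List.slice_toNat l hi0 (by omega), hwc]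
      congr 1
      omega
    -- the count update
    have hcount : PySem.List.pySetD (cnts w) ((c.toNat : Int) - 48)
        (PySem.List.pyGetD (cnts w) ((c.toNat : Int) - 48) 0 + 1) = cnts (w ++ [c]) :=
      cnts_append_digit w c hcd.1 hcd.2
    -- A's check equals B's validity test on the extended window
    have hcheck : psCheck (l.foldl psStep [List.replicate 10 0]) i j0 = altValid (cnts (w ++ [c])) := by
      apply psCheck_eq_altValid _ _ _ _ (by simp [cnts]) (by
        simp [cnts]
        intro a ha
        split <;> omega)
      intro k hk0 hk10
      rw [psCnt_spec l hd i j0 k hi0 hij hjlt hk0 hk10]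
      congr 2
      rw [hwc]
      congr 1
      omega
    -- one step of B
    have hstep : altStep l (cnts w, (w, res)) j0
        = (cnts (w ++ [c]), (w ++ [c], if altValid (cnts (w ++ [c])) then PySem.Set.add res (w ++ [c]) else res)) := by
      rw [altStep]
      simp only [hget, hcount]
    rw [hstep, hcheck, hslice]
    have hih := ih (j0 + 1) (by omega) (by omega) (by omega)
      (if altValid (cnts (w ++ [c])) then PySem.Set.add res (w ++ [c]) else res)
    rw [hwc] at hih
    rw [hwc]
    exact hih

theorem ports_agree (s : String) (hpre : ∀ c ∈ s.toList, 48 ≤ c.toNat ∧ c.toNat ≤ 57) :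
    equalDigitFrequency s = equalDigitFrequency_alt s := by
  rw [equalDigitFrequency, equalDigitFrequency_alt]
  simp only [PySem.List.len_eq]
  congr 1
  congr 1
  apply PySem.List.foldl_congr_mem
  intro res i hi
  rw [PySem.List.mem_pyRange_one] at hi
  have h := inner_inv s.toList hpre i hi.1 (by exact_mod_cast hi.2)
    ((s.toList.length : Int) - i).toNat i (le_refl i) (by exact_mod_cast le_of_lt hi.2) rfl res
  have hz : ((i - i).toNat) = 0 := by omega
  rw [hz, List.take_zero, cnts_nil] at h
  exact h

-- ===== VERDICT (by name: the statement is the Claim_ definition above) =====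
theorem equalDigitFrequency_spec : Claim_equal_equalDigitFrequency := by
  intro s _ hpre
  unfold Spec_equalDigitFrequency
  apply ports_agree
  intro c hc
  have h := List.all_eq_true.mp hpre c hc
  simp at h
  exact ⟨h.1, h.2⟩
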